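-- pv_equiv track=rewrite | github.com/diwana1221/dic | bot1.py | make_sound
-- ===== SOURCE A (Python) =====
-- SOUND_MAP = {
--     'a': 'е', 'e': 'і', 'i': 'ай', 'o': 'оу', 'u': 'ю', 'y': 'ай',
--     'b': 'б', 'c': 'к', 'd': 'д', 'f': 'ф', 'g': 'г', 'h': 'х',
--     'j': 'дж', 'k': 'к', 'l': 'л', 'm': 'м', 'n': 'н', 'p': 'п',
--     'q': 'к', 'r': 'р', 's': 'с', 't': 'т', 'v': 'в', 'w': 'в',
--     'x': 'кс', 'z': 'з', 'ch': 'ч', 'sh': 'ш', 'th': 'с', 'ph': 'ф',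
--     'ck': 'к', 'ng': 'нг', 'wh': 'в', 'qu': 'кв'
-- }
--
-- def make_sound(word):
--     word = word.lower()
--     result = []
--     i = 0
--
--     while i < len(word):
--         if i + 1 < len(word) and word[i:i+2] in SOUND_MAP:
--             result.append(SOUND_MAP[word[i:i+2]])
--             i += 2
--         elif word[i] in SOUND_MAP:
--             result.append(SOUND_MAP[word[i]])
--             i += 1
--         else:
--             result.append(word[i])
--             i += 1
--
--     return ''.join(result)
-- ===== SOURCE B (Python) =====
-- import re
--
-- SOUND_MAP = {
--     'a': 'е', 'e': 'і', 'i': 'ай', 'o': 'оу', 'u': 'ю', 'y': 'ай',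
--     'b': 'б', 'c': 'к', 'd': 'д', 'f': 'ф', 'g': 'г', 'h': 'х',
--     'j': 'дж', 'k': 'к', 'l': 'л', 'm': 'м', 'n': 'н', 'p': 'п',
--     'q': 'к', 'r': 'р', 's': 'с', 't': 'т', 'v': 'в', 'w': 'в',
--     'x': 'кс', 'z': 'з', 'ch': 'ч', 'sh': 'ш', 'th': 'с', 'ph': 'ф',
--     'ck': 'к', 'ng': 'нг', 'wh': 'в', 'qu': 'кв'
-- }
--
-- # two-character keys must come first in the alternation so a digraph wins
-- # over its first letter, matching the greedy longest-first scan.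
-- _DIGRAPHS = [k for k in SOUND_MAP if len(k) == 2]
-- _SINGLES = [k for k in SOUND_MAP if len(k) == 1]
-- _PATTERN = re.compile('|'.join(_DIGRAPHS + _SINGLES))
--
-- def make_sound(word):
--     return _PATTERN.sub(lambda m: SOUND_MAP[m.group()], word.lower())
-- ===== Notes on version B (the rewrite author's own statement) =====
-- stated objective: idiomatic
-- what changed: The explicit index-while loop with manual 2-then-1 character slicing is replaced by one precompiled regex alternation (digraph keys listed before single-character keys) applied in a single re.sub pass over word.lower().
import Mathlib
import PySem

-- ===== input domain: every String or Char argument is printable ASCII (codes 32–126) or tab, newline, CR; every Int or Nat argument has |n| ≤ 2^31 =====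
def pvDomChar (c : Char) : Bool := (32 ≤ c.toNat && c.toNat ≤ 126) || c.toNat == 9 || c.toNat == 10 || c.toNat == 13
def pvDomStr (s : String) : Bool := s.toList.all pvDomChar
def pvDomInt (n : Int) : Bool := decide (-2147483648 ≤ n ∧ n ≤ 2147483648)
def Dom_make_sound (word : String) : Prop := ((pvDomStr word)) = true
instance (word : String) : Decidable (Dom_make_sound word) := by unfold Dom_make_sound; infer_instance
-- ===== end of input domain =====

-- B replaces A's index-driven while loop by one precompiled regex alternation (digraph
-- keys first) applied in a single substitution pass; objective: idiomatic. Both total.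

-- ===== PORT A =====
def SOUND_MAP : PySem.Dict String String := PySem.Dict.ofList [
  ("a", "е"), ("e", "і"), ("i", "ай"), ("o", "оу"), ("u", "ю"), ("y", "ай"),
  ("b", "б"), ("c", "к"), ("d", "д"), ("f", "ф"), ("g", "г"), ("h", "х"),
  ("j", "дж"), ("k", "к"), ("l", "л"), ("m", "м"), ("n", "н"), ("p", "п"),
  ("q", "к"), ("r", "р"), ("s", "с"), ("t", "т"), ("v", "в"), ("w", "в"),
  ("x", "кс"), ("z", "з"), ("ch", "ч"), ("sh", "ш"), ("th", "с"), ("ph", "ф"),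
  ("ck", "к"), ("ng", "нг"), ("wh", "в"), ("qu", "кв")]

-- A's while loop over the index i, transcribed as recursion on the suffix word[i:]
-- (the loop body only reads word[i:i+2] and word[i]); the 'result' list of appended
-- pieces is the returned list, joined by ''.join at the end.  SOUND_MAP[...] is guarded
-- by the 'in' test, so Dict.getD with a dummy default is exact.  The sound map is a
-- parameter SM only so that the definition unfolds without evaluating the literal dict.
def loop_aux (SM : PySem.Dict String String) : List Char → List String
  | [] => []
  | [c] =>  -- i + 1 = len(word): only the single-char branches are reachable
    if SM.contains (String.ofList [c]) then [SM.getD (String.ofList [c]) ""]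
    else [String.ofList [c]]
  | c :: d :: t =>  -- i + 1 < len(word); word[i:i+2] = [c, d]
    if SM.contains (String.ofList [c, d]) then
      SM.getD (String.ofList [c, d]) "" :: loop_aux SM t
    else if SM.contains (String.ofList [c]) then
      SM.getD (String.ofList [c]) "" :: loop_aux SM (d :: t)
    else
      String.ofList [c] :: loop_aux SM (d :: t)

def make_sound (word : String) : String :=
  PySem.Str.join "" (loop_aux SOUND_MAP (PySem.Str.lower word).toList)

-- ===== PORT B =====
-- Source B's pattern alternatives: all two-character keys of SOUND_MAP, then all
-- one-character keys.
def PATTERN_KEYS : List String :=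
  (SOUND_MAP.keys.filter (fun k => k.toList.length == 2)) ++
  (SOUND_MAP.keys.filter (fun k => k.toList.length == 1))

-- Hand port of re.sub with the fixed literal alternation _PATTERN (PySem has no regex):
-- at each position the engine tries the alternatives left to right and takes the first
-- that matches (a literal alternative matches iff it is a prefix), substitutes
-- SOUND_MAP[m.group()] and resumes right after the matched key (its length-1 characters
-- beyond the head); an unmatched character is copied unchanged.  This is exact for a
-- literal-alternation pattern.  P/SM are parameters only so that the definition unfolds
-- without evaluating the literal dict.
def sub_aux (P : List String) (SM : PySem.Dict String String) : List Char → List Char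
  | [] => []
  | c :: rest =>
    match P.find? (fun k => PySem.Chars.startswith (c :: rest) k.toList) with
    | some k => (SM.getD k "").toList ++ sub_aux P SM (rest.drop (k.toList.length - 1))
    | none => c :: sub_aux P SM rest
termination_by l => l.length
decreasing_by
  all_goals simp only [List.length_cons, List.length_drop]
  all_goals omega

def make_sound_alt (word : String) : String :=
  String.ofList (sub_aux PATTERN_KEYS SOUND_MAP (PySem.Str.lower word).toList)

-- ===== PRECONDITION & SPEC =====
def Spec_make_sound (word : String) (out : String) : Prop := out = make_sound_alt word
instance (word : String) (out : String) : Decidable (Spec_make_sound word out) := by unfold Spec_make_sound; infer_instance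

-- ===== CLAIM (what is proved, stated in full; the proofs are below) =====
def Claim_equal_make_sound : Prop := ∀ (word : String), Dom_make_sound word → Spec_make_sound word (make_sound word)

-- ===== LEMMAS AND PROOFS =====

lemma join_nil_eq_flatten (xss : List (List Char)) : PySem.Chars.join [] xss = xss.flatten := by
  induction xss with
  | nil => rfl
  | cons x xs ih => cases xs with
    | nil => rw [PySem.Chars.join_singleton]; simp
    | cons y ys => rw [PySem.Chars.join_cons_cons]; simp_all

-- the first length-2 alternative that matches at the head of c :: d :: t is [c, d] itself
lemma find?_two (K : List String) (h : ∀ k ∈ K, k.toList.length = 2) (c d : Char) (t : List Char) :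
    K.find? (fun k => PySem.Chars.startswith (c :: d :: t) k.toList) =
      if String.ofList [c, d] ∈ K then some (String.ofList [c, d]) else none := by
  induction K with
  | nil => simp
  | cons k K ih =>
    have hk2 : k.toList.length = 2 := h k (by simp)
    obtain ⟨x, y, hxy⟩ := List.length_eq_two.mp hk2
    have hkey : (PySem.Chars.startswith (c :: d :: t) k.toList = true) ↔ k = String.ofList [c, d] := by
      rw [PySem.Chars.startswith_iff]
      constructor
      · intro hp
        rw [hxy] at hp
        simp only [List.cons_prefix_cons] at hp
        apply String.toList_inj.mp
        simp [hxy, hp.1, hp.2.1]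
      · intro he; subst he
        simp [List.cons_prefix_cons]
    by_cases hc : k = String.ofList [c, d]
    · rw [List.find?_cons_of_pos (p := fun (k : String) => PySem.Chars.startswith (c :: d :: t) k.toList)
            (hkey.mpr hc), hc]
      simp
    · rw [List.find?_cons_of_neg (p := fun (k : String) => PySem.Chars.startswith (c :: d :: t) k.toList)
            (by simp [hkey, hc]),
          ih (fun k hk => h k (by simp [hk]))]
      have hne : String.ofList [c, d] ≠ k := fun h' => hc h'.symm
      simp [List.mem_cons, hne]

-- no length-2 alternative matches a one-character remainder
lemma find?_two_short (K : List String) (h : ∀ k ∈ K, k.toList.length = 2) (c : Char) :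
    K.find? (fun k => PySem.Chars.startswith [c] k.toList) = none := by
  rw [List.find?_eq_none]
  intro k hk
  have hk2 : k.toList.length = 2 := h k hk
  intro hp
  simp only [PySem.Chars.startswith_iff] at hp
  have hle := hp.length_le
  simp only [List.length_cons, List.length_nil] at hle
  omega

-- the first length-1 alternative that matches at the head of c :: rest is [c] itself
lemma find?_one (K : List String) (h : ∀ k ∈ K, k.toList.length = 1) (c : Char) (rest : List Char) :
    K.find? (fun k => PySem.Chars.startswith (c :: rest) k.toList) =
      if String.ofList [c] ∈ K then some (String.ofList [c]) else none := by
  induction K with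
  | nil => simp
  | cons k K ih =>
    have hk1 : k.toList.length = 1 := h k (by simp)
    obtain ⟨x, hx⟩ := List.length_eq_one_iff.mp hk1
    have hkey : (PySem.Chars.startswith (c :: rest) k.toList = true) ↔ k = String.ofList [c] := by
      rw [PySem.Chars.startswith_iff]
      constructor
      · intro hp
        rw [hx] at hp
        simp only [List.cons_prefix_cons] at hp
        apply String.toList_inj.mp
        simp [hx, hp.1]
      · intro he; subst he
        simp [List.cons_prefix_cons]
    by_cases hc : k = String.ofList [c]
    · rw [List.find?_cons_of_pos (p := fun (k : String) => PySem.Chars.startswith (c :: rest) k.toList)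
            (hkey.mpr hc), hc]
      simp
    · rw [List.find?_cons_of_neg (p := fun (k : String) => PySem.Chars.startswith (c :: rest) k.toList)
            (by simp [hkey, hc]),
          ih (fun k hk => h k (by simp [hk]))]
      have hne : String.ofList [c] ≠ k := fun h' => hc h'.symm
      simp [List.mem_cons, hne]

lemma twos_len : ∀ k ∈ SOUND_MAP.keys.filter (fun k => k.toList.length == 2), k.toList.length = 2 :=
  fun _ hk => by simpa using List.of_mem_filter hk

lemma ones_len : ∀ k ∈ SOUND_MAP.keys.filter (fun k => k.toList.length == 1), k.toList.length = 1 :=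
  fun _ hk => by simpa using List.of_mem_filter hk

lemma contains_iff_mem_twos (c d : Char) :
    SOUND_MAP.contains (String.ofList [c, d]) = true ↔
      String.ofList [c, d] ∈ SOUND_MAP.keys.filter (fun k => k.toList.length == 2) := by
  rw [PySem.Dict.contains_iff_mem_keys, List.mem_filter]
  exact ⟨fun h => ⟨h, by simp⟩, fun h => h.1⟩

lemma contains_iff_mem_ones (c : Char) :
    SOUND_MAP.contains (String.ofList [c]) = true ↔
      String.ofList [c] ∈ SOUND_MAP.keys.filter (fun k => k.toList.length == 1) := by
  rw [PySem.Dict.contains_iff_mem_keys, List.mem_filter]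
  exact ⟨fun h => ⟨h, by simp⟩, fun h => h.1⟩

-- the pattern's verdict at a position, phrased through SOUND_MAP.contains
lemma find?_pattern_two (c d : Char) (t : List Char) :
    PATTERN_KEYS.find? (fun k => PySem.Chars.startswith (c :: d :: t) k.toList) =
      if SOUND_MAP.contains (String.ofList [c, d]) = true then some (String.ofList [c, d])
      else if SOUND_MAP.contains (String.ofList [c]) = true then some (String.ofList [c])
      else none := by
  rw [PATTERN_KEYS, List.find?_append, find?_two _ twos_len c d t, find?_one _ ones_len c (d :: t)]
  by_cases h2 : SOUND_MAP.contains (String.ofList [c, d]) = true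
  · rw [if_pos ((contains_iff_mem_twos c d).mp h2), if_pos h2, Option.some_or]
  · rw [if_neg (fun hm => h2 ((contains_iff_mem_twos c d).mpr hm)), if_neg h2, Option.none_or]
    by_cases h1 : SOUND_MAP.contains (String.ofList [c]) = true
    · rw [if_pos ((contains_iff_mem_ones c).mp h1), if_pos h1]
    · rw [if_neg (fun hm => h1 ((contains_iff_mem_ones c).mpr hm)), if_neg h1]

lemma find?_pattern_one (c : Char) :
    PATTERN_KEYS.find? (fun k => PySem.Chars.startswith [c] k.toList) =
      if SOUND_MAP.contains (String.ofList [c]) = true then some (String.ofList [c])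
      else none := by
  rw [PATTERN_KEYS, List.find?_append, find?_two_short _ twos_len c,
      find?_one _ ones_len c [], Option.none_or]
  by_cases h1 : SOUND_MAP.contains (String.ofList [c]) = true
  · rw [if_pos ((contains_iff_mem_ones c).mp h1), if_pos h1]
  · rw [if_neg (fun hm => h1 ((contains_iff_mem_ones c).mpr hm)), if_neg h1]

lemma loop_eq_sub (n : Nat) : ∀ l : List Char, l.length ≤ n →
    ((loop_aux SOUND_MAP l).map String.toList).flatten = sub_aux PATTERN_KEYS SOUND_MAP l := by
  induction n with
  | zero =>
    intro l hl
    have : l = [] := List.eq_nil_of_length_eq_zero (Nat.le_zero.mp hl)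
    subst this
    simp only [loop_aux, sub_aux, List.map_nil, List.flatten_nil]
  | succ n ih =>
    intro l hl
    match l with
    | [] => simp only [loop_aux, sub_aux, List.map_nil, List.flatten_nil]
    | [c] =>
      rw [sub_aux, find?_pattern_one c]
      by_cases h1 : SOUND_MAP.contains (String.ofList [c]) = true
      · rw [if_pos h1]
        simp only [loop_aux, h1, if_true, List.map_cons, List.map_nil, List.flatten_cons,
          List.flatten_nil, String.toList_ofList, List.length_cons, List.length_nil,
          List.drop_nil]
        rw [sub_aux]
      · rw [if_neg h1]
        simp only [loop_aux, h1, if_false, Bool.false_eq_true, List.map_cons, List.map_nil,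
          List.flatten_cons, List.flatten_nil]
        rw [sub_aux]
        simp
    | c :: d :: t =>
      have ht := ih t (by simp at hl ⊢; omega)
      have hdt := ih (d :: t) (by simp at hl ⊢; omega)
      rw [sub_aux, find?_pattern_two c d t]
      by_cases h2 : SOUND_MAP.contains (String.ofList [c, d]) = true
      · rw [if_pos h2]
        simp only [loop_aux, h2, if_true, List.map_cons, List.flatten_cons]
        simp [ht]
      · rw [if_neg h2]
        by_cases h1 : SOUND_MAP.contains (String.ofList [c]) = true
        · rw [if_pos h1]
          simp only [loop_aux, h2, h1, if_true, if_false, Bool.false_eq_true, List.map_cons,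
            List.flatten_cons]
          simp [hdt]
        · rw [if_neg h1]
          simp only [loop_aux, h2, h1, if_false, Bool.false_eq_true, List.map_cons,
            List.flatten_cons]
          simp [hdt]

-- ===== VERDICT (by name: the statement is the Claim_ definition above) =====
theorem make_sound_spec : Claim_equal_make_sound := by
  intro word _
  unfold Spec_make_sound make_sound make_sound_alt
  refine String.toList_inj.mp ?_
  rw [PySem.Str.toList_join]
  rw [show ("" : String).toList = [] from rfl, join_nil_eq_flatten, String.toList_ofList]
  exact loop_eq_sub _ _ (Nat.le_refl _)
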